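-- pv_equiv track=rewrite | github.com/Leoo99G/RouteAligner | src/update_routes.py | generate_trip_sequence
-- ===== SOURCE A (Python) =====
-- def generate_trip_sequence(freqdic, max_length: int = None) -> list:
--     """
--     :param freqdic: dictionary of frequent trips among the actual routes (output of *frequent* function)
--     :param max_length: "maximum" length of an updated standard route
--     :return: updated standard route (list) based on the frequency dictionary given as input
--     """
--     new_route = []
--     first_key = list(freqdic.keys())[0]
--     new_route.append(first_key)
--     last_city = first_key[1]  # Last visited city (starting city of next trip)
--     start_city = first_key[0]  # City already visited
--
--     # Delete all the trips that contain the already visited cities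
--     for key in list(freqdic.keys()):
--         if start_city in key:
--             del freqdic[key]
--
--     while freqdic and (max_length is None or len(new_route) < max_length):
--
--         selected_trip = None
--         # Check if the first trip starts with the last visited city (if there is one)
--         first_key = list(freqdic.keys())[0]
--         if first_key[0] == last_city:
--             selected_trip = first_key
--
--         # If there is such trip, add it to the new_route list
--         if selected_trip:
--             new_route.append(selected_trip)
--             start_city = selected_trip[0]
--             last_city = selected_trip[1]
--             for key in list(freqdic.keys()):
--                 if start_city in key:
--                     del freqdic[key]
--         else:
--             for key in list(freqdic.keys()):
--                 if last_city == key[1]: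
--                     del freqdic[key]
--             if freqdic:
--                 dummy_start = last_city
--                 dummy_end = str(list(freqdic.keys())[0][0])
--                 dummy_trip = (dummy_start, dummy_end)
--                 new_route.append(dummy_trip)
--                 new_route.append(list(freqdic.keys())[0])
--
--                 start_city = dummy_end
--                 last_city = list(freqdic.keys())[0][1]
--
--                 for key in list(freqdic.keys()):
--                     if start_city in key:
--                         del freqdic[key]
--             else:
--                 return new_route
--
--     return new_route
-- ===== SOURCE B (Python) =====
-- def generate_trip_sequence(freqdic, max_length: int = None) -> list:
--     """Single forward scan over the trip keys: instead of repeatedly rebuilding the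
--     dictionary, remember which cities are blocked (every trip touching them is dead)
--     and which end-cities are dead, and skip dead trips while scanning once."""
--     keys = list(freqdic)
--     start, last = keys[0][0], keys[0][1]
--     route = [keys[0]]
--     blocked = {start}
--     dead_ends = set()
--     n = len(keys)
--
--     def next_live(i):
--         while i < n:
--             a, b = keys[i]
--             if a not in blocked and b not in blocked and b not in dead_ends:
--                 return i
--             i += 1
--         return None
--
--     i = 1
--     while max_length is None or len(route) < max_length:
--         i = next_live(i)
--         if i is None:
--             return route
--         a, b = keys[i]
--         if a != last:
--             dead_ends.add(last)
--             i = next_live(i)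
--             if i is None:
--                 return route
--             a, b = keys[i]
--             route.append((last, a))
--         route.append((a, b))
--         blocked.add(a)
--         last = b
--         i += 1
--     return route
-- ===== Notes on version B (the rewrite author's own statement) =====
-- stated objective: faster
-- what changed: A repeatedly snapshots the dict's key list and deletes matching entries after every selection (a full rebuild per step); B makes one forward scan over the key list, maintaining a set of blocked cities and a set of dead end-cities and skipping dead trips, so no deletion pass ever happens.
import Mathlib
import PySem

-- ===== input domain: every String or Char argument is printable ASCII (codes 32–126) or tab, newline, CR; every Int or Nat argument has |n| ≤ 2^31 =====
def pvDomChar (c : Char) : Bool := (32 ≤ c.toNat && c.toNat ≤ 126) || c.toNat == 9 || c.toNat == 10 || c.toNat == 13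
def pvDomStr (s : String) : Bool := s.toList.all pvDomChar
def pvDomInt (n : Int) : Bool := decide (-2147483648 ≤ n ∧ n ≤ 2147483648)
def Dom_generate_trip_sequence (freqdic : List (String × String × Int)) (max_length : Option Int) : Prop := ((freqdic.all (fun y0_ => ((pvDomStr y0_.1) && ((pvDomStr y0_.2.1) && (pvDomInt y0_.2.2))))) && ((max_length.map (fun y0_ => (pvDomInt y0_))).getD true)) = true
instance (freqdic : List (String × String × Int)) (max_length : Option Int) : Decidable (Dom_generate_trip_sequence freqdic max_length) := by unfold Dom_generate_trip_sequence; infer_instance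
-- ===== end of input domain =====

-- B replaces A's per-step key-list snapshot-and-delete passes by ONE forward scan with sets of
-- blocked cities / dead end-cities; measured faster. A mutates its input dict in Python (del);
-- the equivalence proved here is about the RETURN value only (B does not mutate its input).

-- ===== PORT A =====
-- shared guard: 'max_length is None or len(new_route) < max_length' (identical expression in both Pythons)
def pvLenOk (max_length : Option Int) (n : Nat) : Bool :=
  match max_length with
  | none => true
  | some m => decide ((n : Int) < m)

-- 'for key in list(freqdic.keys()): if start_city in key: del freqdic[key]'  (appears three times in A)
def pvDelStart (c : String) (d : PySem.Dict (String × String) Int) : PySem.Dict (String × String) Int :=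
  (PySem.Dict.keys d).foldl (fun dd kk => if c == kk.1 || c == kk.2 then PySem.Dict.erase dd kk else dd) d

-- A's while loop; the fuel guard only makes it total (each iteration deletes the selected key,
-- so the initial size + 1 is never exhausted)
def pvLoopA (fuel : Nat) (d : PySem.Dict (String × String) Int) (last : String)
    (route : List (String × String)) (max_length : Option Int) : List (String × String) :=
  match fuel with
  | 0 => route
  | fuel + 1 =>
    if (!(PySem.Dict.keys d).isEmpty) && pvLenOk max_length route.length then
      match PySem.Dict.keys d with
      | [] => route
      | k :: _ =>
        if k.1 == last then
          pvLoopA fuel (pvDelStart k.1 d) k.2 (route ++ [k]) max_length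
        else
          -- 'for key in list(freqdic.keys()): if last_city == key[1]: del freqdic[key]'
          match PySem.Dict.keys ((PySem.Dict.keys d).foldl
              (fun dd kk => if last == kk.2 then PySem.Dict.erase dd kk else dd) d) with
          | [] => route
          | k2 :: _ =>
            pvLoopA fuel
              (pvDelStart k2.1 ((PySem.Dict.keys d).foldl
                (fun dd kk => if last == kk.2 then PySem.Dict.erase dd kk else dd) d))
              k2.2 (route ++ [(last, k2.1), k2]) max_length
    else route

def generate_trip_sequence (freqdic : List (String × String × Int)) (max_length : Option Int) : List (String × String) :=
  let d := PySem.Dict.ofList (freqdic.map (fun t => ((t.1, t.2.1), t.2.2)))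
  match PySem.Dict.keys d with
  | [] => []   -- Python: list(freqdic.keys())[0] raises IndexError here (excluded by Pre_)
  | k :: _ =>
    let d1 := pvDelStart k.1 d
    pvLoopA (PySem.Dict.size d1 + 1) d1 k.2 [k] max_length

-- ===== PORT B =====
-- 'a in blocked or b in blocked or b in dead_ends'
def pvBlockedTrip (blocked dead_ends : PySem.Set String) (k : String × String) : Bool :=
  PySem.Set.contains blocked k.1 || PySem.Set.contains blocked k.2 || PySem.Set.contains dead_ends k.2

-- next_live: Python's inner index-advancing while loop = drop the dead prefix of the key suffix
def pvNextLive (blocked dead_ends : PySem.Set String) (ks : List (String × String)) : List (String × String) :=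
  ks.dropWhile (pvBlockedTrip blocked dead_ends)

-- B's while loop over the remaining key suffix; the fuel guard only makes it total (every
-- iteration advances past at least one key, so the suffix length + 1 is never exhausted)
def pvLoopB (fuel : Nat) (ks : List (String × String)) (blocked dead_ends : PySem.Set String)
    (last : String) (route : List (String × String)) (max_length : Option Int) : List (String × String) :=
  match fuel with
  | 0 => route
  | fuel + 1 =>
    if pvLenOk max_length route.length then
      match pvNextLive blocked dead_ends ks with
      | [] => route
      | k :: rest =>
        if k.1 == last then
          pvLoopB fuel rest (PySem.Set.add blocked k.1) dead_ends k.2 (route ++ [k]) max_length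
        else
          match pvNextLive blocked (PySem.Set.add dead_ends last) (k :: rest) with
          | [] => route
          | k2 :: rest2 =>
            pvLoopB fuel rest2 (PySem.Set.add blocked k2.1) (PySem.Set.add dead_ends last) k2.2
              (route ++ [(last, k2.1), k2]) max_length
    else route

def generate_trip_sequence_alt (freqdic : List (String × String × Int)) (max_length : Option Int) : List (String × String) :=
  match PySem.Dict.keys (PySem.Dict.ofList (freqdic.map (fun t => ((t.1, t.2.1), t.2.2)))) with
  | [] => []   -- Python: keys[0] raises IndexError here (excluded by Pre_)
  | k :: rest =>
    pvLoopB (rest.length + 1) rest (PySem.Set.add PySem.Set.empty k.1) PySem.Set.empty k.2 [k] max_length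

-- ===== PRECONDITION & SPEC =====
-- Pre_ excludes only the empty input, on which both Pythons raise IndexError.
def Pre_generate_trip_sequence (freqdic : List (String × String × Int)) (max_length : Option Int) : Prop :=
  freqdic ≠ []
instance (freqdic : List (String × String × Int)) (max_length : Option Int) : Decidable (Pre_generate_trip_sequence freqdic max_length) := by unfold Pre_generate_trip_sequence; infer_instance

def pvWitness_generate_trip_sequence : (List (String × String × Int)) × Option Int :=
  ([("a", "b", 1), ("b", "c", 2)], none)

def Spec_generate_trip_sequence (freqdic : List (String × String × Int)) (max_length : Option Int) (out : List (String × String)) : Prop := out = generate_trip_sequence_alt freqdic max_length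
instance (freqdic : List (String × String × Int)) (max_length : Option Int) (out : List (String × String)) : Decidable (Spec_generate_trip_sequence freqdic max_length out) := by unfold Spec_generate_trip_sequence; infer_instance

-- ===== CLAIM (what is proved, stated in full; the proofs are below) =====
def Claim_equal_generate_trip_sequence : Prop := ∀ (freqdic : List (String × String × Int)) (max_length : Option Int), Dom_generate_trip_sequence freqdic max_length → Pre_generate_trip_sequence freqdic max_length → Spec_generate_trip_sequence freqdic max_length (generate_trip_sequence freqdic max_length)

-- ===== LEMMAS AND PROOFS =====

-- a snapshot-and-delete pass over list L removes exactly the items whose key is in L and matches p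
lemma pvDelFold_items (p : (String × String) → Bool) (L : List (String × String))
    (d : PySem.Dict (String × String) Int) :
    (L.foldl (fun dd kk => if p kk then PySem.Dict.erase dd kk else dd) d).items
      = d.items.filter (fun q => !(p q.1 && L.contains q.1)) := by
  induction L generalizing d with
  | nil => simp
  | cons a L ih =>
    rw [List.foldl_cons, ih]
    by_cases hp : p a = true
    · simp only [hp, if_true, PySem.Dict.erase]
      rw [List.filter_filter]
      refine List.filter_congr ?_
      intro q _
      by_cases hxa : q.1 = a
      · simp [hxa, hp]
      · simp [hxa]
    · simp only [Bool.not_eq_true] at hp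
      simp only [hp, Bool.false_eq_true, if_false]
      refine List.filter_congr ?_
      intro q _
      by_cases hxa : q.1 = a
      · simp [hxa, hp]
      · simp [hxa]

-- the delete pass over the dict's own key snapshot = one filter on the key list
lemma pvDelFold_keys (p : (String × String) → Bool) (d : PySem.Dict (String × String) Int) :
    PySem.Dict.keys ((PySem.Dict.keys d).foldl (fun dd kk => if p kk then PySem.Dict.erase dd kk else dd) d)
      = (PySem.Dict.keys d).filter (fun k => !p k) := by
  simp only [PySem.Dict.keys, pvDelFold_items]
  rw [List.filter_map]
  congr 1
  refine List.filter_congr ?_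
  intro q hq
  have hmem : q.1 ∈ d.items.map Prod.fst := List.mem_map_of_mem hq
  simp only [Function.comp]
  simp [hmem]

lemma pvDelStart_keys (c : String) (d : PySem.Dict (String × String) Int) :
    PySem.Dict.keys (pvDelStart c d) = (PySem.Dict.keys d).filter (fun k => !(c == k.1 || c == k.2)) :=
  pvDelFold_keys (fun kk => c == kk.1 || c == kk.2) d

-- dropWhile vs filter of the complement
lemma pvDropWhile_nil {α : Type} (p : α → Bool) (ks : List α)
    (h : ks.dropWhile p = []) : ks.filter (fun x => !p x) = [] := by
  induction ks with
  | nil => rfl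
  | cons a l ih =>
    rw [List.dropWhile_cons] at h
    by_cases hp : p a = true
    · simp only [hp, if_true] at h
      simp [hp, ih h]
    · simp [hp] at h

lemma pvDropWhile_cons {α : Type} (p : α → Bool) (ks : List α)
    (k : α) (rest : List α) (h : ks.dropWhile p = k :: rest) :
    p k = false ∧ ks.filter (fun x => !p x) = k :: rest.filter (fun x => !p x) := by
  induction ks with
  | nil => simp at h
  | cons a l ih =>
    rw [List.dropWhile_cons] at h
    by_cases hp : p a = true
    · simp only [hp, if_true] at h
      have := ih h
      simp [hp, this.2, this.1]
    · simp only [if_neg hp] at h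
      obtain ⟨rfl, rfl⟩ := List.cons.inj h
      simp only [Bool.not_eq_true] at hp
      simp [hp]

lemma pvBlockedAux (s : PySem.Set String) (c x : String) :
    PySem.Set.contains (PySem.Set.add s c) x = (PySem.Set.contains s x || x == c) := by
  simp only [PySem.Set.contains_eq_listContains, List.contains_eq_mem, PySem.Set.mem_add]
  by_cases h1 : x ∈ s <;> by_cases h2 : x = c <;> simp [h1, h2]

lemma pvBlocked_add_blocked (blocked dead : PySem.Set String) (c : String) (k : String × String) :
    pvBlockedTrip (PySem.Set.add blocked c) dead k
      = (pvBlockedTrip blocked dead k || (c == k.1 || c == k.2)) := by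
  simp only [pvBlockedTrip, pvBlockedAux, BEq.comm (a := c)]
  ac_rfl

lemma pvBlocked_add_dead (blocked dead : PySem.Set String) (c : String) (k : String × String) :
    pvBlockedTrip blocked (PySem.Set.add dead c) k
      = (pvBlockedTrip blocked dead k || (c == k.2)) := by
  simp only [pvBlockedTrip, pvBlockedAux, BEq.comm (a := c)]
  ac_rfl

-- selecting trip k and deleting every trip containing k.1 = blocking city k.1 in the scan
lemma pvKeysDelSel (blocked dead : PySem.Set String) (k : String × String)
    (tl : List (String × String)) (d : PySem.Dict (String × String) Int)
    (hk : PySem.Dict.keys d = k :: tl.filter (fun x => !pvBlockedTrip blocked dead x)) :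
    PySem.Dict.keys (pvDelStart k.1 d)
      = tl.filter (fun x => !pvBlockedTrip (PySem.Set.add blocked k.1) dead x)
    ∧ (PySem.Dict.keys (pvDelStart k.1 d)).length
      ≤ (tl.filter (fun x => !pvBlockedTrip blocked dead x)).length := by
  have h1 : PySem.Dict.keys (pvDelStart k.1 d)
      = (tl.filter (fun x => !pvBlockedTrip blocked dead x)).filter
          (fun x => !(k.1 == x.1 || k.1 == x.2)) := by
    rw [pvDelStart_keys, hk, List.filter_cons]
    simp
  constructor
  · rw [h1, List.filter_filter]
    refine List.filter_congr ?_
    intro x _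
    rw [pvBlocked_add_blocked]
    simp only [Bool.not_or]
    ac_rfl
  · rw [h1]; exact List.length_filter_le _ _

-- main loop equivalence: A's dict keys = the live trips of B's remaining suffix
lemma pvLoopAB (fuelA fuelB : Nat) (ks : List (String × String)) (blocked dead : PySem.Set String)
    (last : String) (route : List (String × String)) (max_length : Option Int)
    (d : PySem.Dict (String × String) Int)
    (hk : PySem.Dict.keys d = ks.filter (fun k => !pvBlockedTrip blocked dead k))
    (hfA : (PySem.Dict.keys d).length < fuelA) (hfB : ks.length < fuelB) :
    pvLoopA fuelA d last route max_length = pvLoopB fuelB ks blocked dead last route max_length := by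
  induction fuelA generalizing fuelB ks blocked dead last route d with
  | zero => omega
  | succ fuelA ih =>
    cases fuelB with
    | zero => omega
    | succ fuelB =>
      rw [pvLoopA, pvLoopB]
      cases h1 : pvNextLive blocked dead ks with
      | nil =>
        have hnil := pvDropWhile_nil _ _ h1
        rw [hnil] at hk
        simp [hk]
      | cons k rest =>
        obtain ⟨hbk, hfil⟩ := pvDropWhile_cons _ _ _ _ h1
        rw [hfil] at hk
        have h1' : ks.dropWhile (pvBlockedTrip blocked dead) = k :: rest := h1
        have hrest : rest.length < ks.length := by
          have := List.length_dropWhile_le (pvBlockedTrip blocked dead) ks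
          rw [h1'] at this; simp at this; omega
        cases hlen : pvLenOk max_length route.length with
        | false => simp
        | true =>
          simp only [hk, Bool.and_true, List.isEmpty_cons, Bool.not_false, if_true]
          by_cases hkl : (k.1 == last) = true
          · rw [if_pos hkl, if_pos hkl]
            obtain ⟨hk', hle'⟩ := pvKeysDelSel blocked dead k rest d hk
            refine ih fuelB rest _ dead k.2 (route ++ [k]) _ hk' ?_ (by omega)
            have : (PySem.Dict.keys d).length < fuelA + 1 := hfA
            rw [hk] at this; simp at this
            omega
          · rw [if_neg hkl, if_neg hkl]
            have hstep : ∀ (l : List (String × String)),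
                (l.filter (fun x => !pvBlockedTrip blocked dead x)).filter (fun x => !(last == x.2))
                  = l.filter (fun x => !pvBlockedTrip blocked (PySem.Set.add dead last) x) := by
              intro l
              rw [List.filter_filter]
              refine List.filter_congr ?_
              intro x _
              rw [pvBlocked_add_dead]
              simp only [Bool.not_or]
              ac_rfl
            have hconskr : (k :: rest).filter (fun x => !pvBlockedTrip blocked dead x)
                = k :: rest.filter (fun x => !pvBlockedTrip blocked dead x) :=
              List.filter_cons_of_pos (by simp [hbk])
            have hrhs : (k :: rest.filter (fun x => !pvBlockedTrip blocked dead x)).filter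
                  (fun x => !(last == x.2))
                = (k :: rest).filter (fun x => !pvBlockedTrip blocked (PySem.Set.add dead last) x) := by
              rw [← hconskr]
              exact hstep (k :: rest)
            have hd2 := pvDelFold_keys (fun kk => last == kk.2) d
            rw [hk] at hd2
            have hd2' := hd2.trans hrhs
            cases h2 : pvNextLive blocked (PySem.Set.add dead last) (k :: rest) with
            | nil =>
              have hnil2 := pvDropWhile_nil _ _ h2
              rw [hnil2] at hd2'
              simp only [hd2']
            | cons k2 rest2 =>
              obtain ⟨_, hfil2⟩ := pvDropWhile_cons _ _ _ _ h2
              rw [hfil2] at hd2'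
              simp only [hd2']
              obtain ⟨hk2', hle2'⟩ := pvKeysDelSel blocked (PySem.Set.add dead last) k2 rest2 _ hd2'
              refine ih fuelB rest2 _ _ k2.2 (route ++ [(last, k2.1), k2]) _ hk2' ?_ ?_
              · have hq : ((k :: rest).filter
                      (fun x => !pvBlockedTrip blocked (PySem.Set.add dead last) x)).length
                    ≤ (k :: rest.filter (fun x => !pvBlockedTrip blocked dead x)).length := by
                  rw [← hrhs]
                  exact List.length_filter_le _ _
                rw [hfil2] at hq
                simp only [List.length_cons] at hq
                have hlenk : (PySem.Dict.keys d).length < fuelA + 1 := hfA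
                rw [hk] at hlenk
                simp only [List.length_cons] at hlenk
                omega
              · have h2' : (k :: rest).dropWhile (pvBlockedTrip blocked (PySem.Set.add dead last))
                    = k2 :: rest2 := h2
                have hdw := List.length_dropWhile_le
                  (pvBlockedTrip blocked (PySem.Set.add dead last)) (k :: rest)
                rw [h2'] at hdw
                simp only [List.length_cons] at hdw
                omega

-- ===== VERDICT (by name: the statement is the Claim_ definition above) =====
lemma pvEmptyFilter (l : List (String × String)) :
    l.filter (fun x => !pvBlockedTrip PySem.Set.empty PySem.Set.empty x) = l := by
  rw [List.filter_eq_self]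
  intro x _
  simp [pvBlockedTrip, PySem.Set.empty, PySem.Set.contains]

theorem generate_trip_sequence_spec : Claim_equal_generate_trip_sequence := by
  intro freqdic max_length _ _
  unfold Spec_generate_trip_sequence
  simp only [generate_trip_sequence, generate_trip_sequence_alt]
  cases hkd : PySem.Dict.keys (PySem.Dict.ofList (freqdic.map (fun t => ((t.1, t.2.1), t.2.2)))) with
  | nil => rfl
  | cons k rest =>
    have hk0 : PySem.Dict.keys (PySem.Dict.ofList (freqdic.map (fun t => ((t.1, t.2.1), t.2.2))))
        = k :: rest.filter (fun x => !pvBlockedTrip PySem.Set.empty PySem.Set.empty x) := by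
      rw [pvEmptyFilter]; exact hkd
    obtain ⟨hk1, _⟩ := pvKeysDelSel PySem.Set.empty PySem.Set.empty k rest _ hk0
    refine pvLoopAB _ _ rest (PySem.Set.add PySem.Set.empty k.1) PySem.Set.empty k.2 [k] max_length _ hk1 ?_ ?_
    · simp only [PySem.Dict.keys, PySem.Dict.size, List.length_map]
      omega
    · omega
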